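-- pv_equiv track=rewrite | github.com/kamalbhatia6766/braintrim1 | scr1-10.py | _generate_pattern_sets
-- ===== SOURCE A (Python) =====
-- def _generate_pattern_sets(length):
--     patterns = {}
--     for start in range(10):
--         digits = [(start + i) % 10 for i in range(length)]
--         pattern_name = ''.join(map(str, digits))
--         pattern_set = set()
--         for tens in digits:
--             for ones in digits:
--                 num = tens * 10 + ones
--                 if 0 <= num <= 99: pattern_set.add(num)
--         patterns[pattern_name] = pattern_set
--     return patterns
-- ===== SOURCE B (Python) =====
-- def _generate_pattern_sets(length):
--     # Exploits that the digit sequence is periodic with period 10: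
--     # the pattern name is the 10-digit cycle string repeated, and the
--     # distinct digits are just the first min(length, 10) of the cycle,
--     # so the pair set is a direct product of at most 10x10 values.
--     n = max(length, 0)
--     q, r = divmod(n, 10)
--     patterns = {}
--     for start in range(10):
--         cycle = ''.join(str((start + i) % 10) for i in range(10))
--         pattern_name = cycle * q + cycle[:r]
--         arc = [(start + i) % 10 for i in range(min(n, 10))]
--         patterns[pattern_name] = {t * 10 + o for t in arc for o in arc}
--     return patterns
-- ===== Notes on version B (the rewrite author's own statement) =====
-- stated objective: faster
-- what changed: B uses the period-10 structure of the digit sequence: the name is the 10-digit cycle string repeated (string multiplication plus a prefix slice) and the pair set is a direct product of the first min(length,10) digits, eliminating A's per-digit join and its nested length-squared pair loop.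
import Mathlib
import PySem

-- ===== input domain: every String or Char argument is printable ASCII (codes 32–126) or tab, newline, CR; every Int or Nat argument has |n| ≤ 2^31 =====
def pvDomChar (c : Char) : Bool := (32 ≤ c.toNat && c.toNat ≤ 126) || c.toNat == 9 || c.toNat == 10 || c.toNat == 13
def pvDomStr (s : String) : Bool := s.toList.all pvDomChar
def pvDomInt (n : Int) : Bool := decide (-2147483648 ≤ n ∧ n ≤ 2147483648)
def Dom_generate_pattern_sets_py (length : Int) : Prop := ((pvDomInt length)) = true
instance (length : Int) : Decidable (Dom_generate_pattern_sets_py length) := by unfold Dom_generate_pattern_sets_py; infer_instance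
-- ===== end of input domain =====

-- B exploits the period-10 structure of the digit sequence: the name is the 10-digit cycle
-- string repeated (plus a prefix), and the pair set is a direct product of the first
-- min(length,10) digits — no per-pair loop over length² pairs (measured faster).

-- ===== PORT A =====
def generate_pattern_sets_py (length : Int) : List (String × List Int) :=
  ((PySem.List.pyRange 0 10 1).foldl
    (fun (patterns : PySem.Dict String (List Int)) start =>
      let digits := (PySem.List.pyRange 0 length 1).map (fun i => PySem.Int.mod (start + i) 10)
      let pattern_name := PySem.Str.join "" (digits.map PySem.Int.toStr)
      let pattern_set := digits.foldl
        (fun ps tens =>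
          digits.foldl
            (fun (ps : PySem.Set Int) ones =>
              let num := tens * 10 + ones
              if 0 ≤ num ∧ num ≤ 99 then PySem.Set.add ps num else ps)
            ps)
        PySem.Set.empty
      patterns.insert pattern_name pattern_set)
    PySem.Dict.empty).items

-- ===== PORT B =====
def generate_pattern_sets_py_alt (length : Int) : List (String × List Int) :=
  let n := max length 0
  let q := PySem.Int.floordiv n 10
  let r := PySem.Int.mod n 10
  ((PySem.List.pyRange 0 10 1).foldl
    (fun (patterns : PySem.Dict String (List Int)) start =>
      let cycle := PySem.Str.join "" ((PySem.List.pyRange 0 10 1).map (fun i => PySem.Int.toStr (PySem.Int.mod (start + i) 10)))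
      -- 'cycle * q + cycle[:r]' ported on the char-list side (string * and + are exact there; q, r ≥ 0)
      let pattern_name := String.ofList ((List.replicate q.toNat cycle.toList).flatten ++ (PySem.Str.slice cycle none (some r)).toList)
      let arc := (PySem.List.pyRange 0 (min n 10) 1).map (fun i => PySem.Int.mod (start + i) 10)
      patterns.insert pattern_name
        (PySem.Set.ofList (arc.flatMap (fun tens => arc.map (fun ones => tens * 10 + ones)))))
    PySem.Dict.empty).items

-- ===== PRECONDITION & SPEC =====
def Spec_generate_pattern_sets_py (length : Int) (out : List (String × List Int)) : Prop := out = generate_pattern_sets_py_alt length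
instance (length : Int) (out : List (String × List Int)) : Decidable (Spec_generate_pattern_sets_py length out) := by unfold Spec_generate_pattern_sets_py; infer_instance

-- ===== CLAIM (what is proved, stated in full; the proofs are below) =====
def Claim_equal_generate_pattern_sets_py : Prop := ∀ (length : Int), Dom_generate_pattern_sets_py length → Spec_generate_pattern_sets_py length (generate_pattern_sets_py length)

-- ===== LEMMAS AND PROOFS =====

-- mod 10 is congruent modulo 10
theorem pv_mod_congr (a b : Int) (h : (10:Int) ∣ (a - b)) : PySem.Int.mod a 10 = PySem.Int.mod b 10 := by
  simp only [PySem.Int.mod, Int.fmod_eq_emod]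
  omega

-- the single digit character of (j mod 10)
def pvCh (j : Int) : Char := Char.ofNat (48 + (PySem.Int.mod j 10).toNat)

theorem pv_ch_congr (a b : Int) (h : (10:Int) ∣ (a - b)) : pvCh a = pvCh b := by
  unfold pvCh
  rw [pv_mod_congr a b h]

theorem pv_toChars_digit (d : Int) (h0 : 0 ≤ d) (h1 : d < 10) :
    PySem.Int.toChars d = [Char.ofNat (48 + d.toNat)] := by
  interval_cases d <;> decide

theorem pv_toChars_mod (j : Int) : PySem.Int.toChars (PySem.Int.mod j 10) = [pvCh j] :=
  pv_toChars_digit _ (PySem.Int.mod_nonneg j (by norm_num)) (PySem.Int.mod_lt j (by norm_num))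

-- a periodic map over range m is the 10-block repeated m/10 times plus the first m%10 entries
theorem pv_range_periodic {α : Type} (c : Nat → α) (hper : ∀ k, c (10 + k) = c k) :
    ∀ (qn rn : Nat), rn < 10 →
      (List.range (10 * qn + rn)).map c
        = (List.replicate qn ((List.range 10).map c)).flatten ++ (List.range rn).map c := by
  intro qn
  induction qn with
  | zero => intro rn _; simp
  | succ q ih =>
      intro rn hr
      have h1 : 10 * (q + 1) + rn = 10 + (10 * q + rn) := by omega
      rw [h1, List.range_add, List.map_append, List.map_map]
      have h2 : (List.range (10 * q + rn)).map (c ∘ fun x => 10 + x)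
          = (List.range (10 * q + rn)).map c := by
        apply List.map_congr_left
        intro k _
        exact hper k
      rw [h2, ih rn hr, List.replicate_succ, List.flatten_cons, List.append_assoc]

theorem pv_range_periodic' {α : Type} (c : Nat → α) (hper : ∀ k, c (10 + k) = c k) (m : Nat) :
    (List.range m).map c
      = (List.replicate (m / 10) ((List.range 10).map c)).flatten
          ++ List.take (m % 10) ((List.range 10).map c) := by
  have h := pv_range_periodic c hper (m / 10) (m % 10) (Nat.mod_lt _ (by omega))
  have hm : 10 * (m / 10) + m % 10 = m := by omega
  rw [hm] at h
  rw [h, ← List.map_take, List.take_range]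
  have hmin : min (m % 10) 10 = m % 10 := by omega
  rw [hmin]

-- the name A builds by joining length digit characters, as a char list
theorem pv_joinA_toList (start length : Int) :
    (PySem.Str.join "" (((PySem.List.pyRange 0 length 1).map (fun i => PySem.Int.mod (start + i) 10)).map PySem.Int.toStr)).toList
      = (List.range length.toNat).map (fun k : Nat => pvCh (start + k)) := by
  rw [PySem.Str.toList_join, List.map_map, List.map_map]
  simp only [Function.comp_def]
  have h1 : ((PySem.List.pyRange 0 length 1).map
        (fun i => (PySem.Int.toStr (PySem.Int.mod (start + i) 10)).toList))
      = ((PySem.List.pyRange 0 length 1).map (fun i => pvCh (start + i))).map (fun c => [c]) := by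
    rw [List.map_map]
    simp only [Function.comp_def]
    apply List.map_congr_left
    intro i _
    rw [PySem.Int.toList_toStr, pv_toChars_mod]
  rw [h1]
  have h2 : ("" : String).toList = [] := rfl
  rw [h2, PySem.Chars.join_nil_singletons, PySem.List.pyRange_one, List.map_map]
  simp only [Function.comp_def]
  have h3 : (length - 0).toNat = length.toNat := by omega
  rw [h3]
  apply List.map_congr_left
  intro k _
  norm_num

-- update ignores elements already present
theorem pv_update_of_subset {α : Type} [BEq α] [LawfulBEq α] (s : PySem.Set α) (l : List α)
    (h : ∀ y ∈ l, y ∈ s) : PySem.Set.update s l = s := by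
  rw [PySem.Set.update_eq_append_filter]
  have hnil : List.filter (fun y => !s.contains y) (PySem.Set.ofList l) = [] := by
    rw [List.filter_eq_nil_iff]
    intro y hy
    have hys : y ∈ s := h y ((PySem.Set.mem_ofList _ _).mp hy)
    simp
    exact hys
  rw [hnil, List.append_nil]

-- dedup of a list whose tail repeats earlier elements is its nodup prefix
theorem pv_dedup_append {α : Type} [BEq α] [LawfulBEq α] (ys zs : List α)
    (hys : ys.Nodup) (h : ∀ z ∈ zs, z ∈ ys) : PySem.List.dedup (ys ++ zs) = ys := by
  rw [PySem.List.dedup_eq_ofList, PySem.Set.ofList_append,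
    PySem.Set.ofList_eq_self_of_nodup _ hys]
  exact pv_update_of_subset _ _ h

-- the distinct digits of the cyclic run are exactly its first min(m,10) entries
theorem pv_dedup_range_map (start : Int) (m : Nat) :
    PySem.List.dedup ((List.range m).map (fun k : Nat => PySem.Int.mod (start + k) 10))
      = (List.range (min m 10)).map (fun k : Nat => PySem.Int.mod (start + k) 10) := by
  have hsplit : List.range m
      = List.range (min m 10) ++ (List.range (m - min m 10)).map (fun x => min m 10 + x) := by
    rw [← List.range_add]
    congr 1
    omega
  rw [hsplit, List.map_append]
  apply pv_dedup_append
  · apply List.Nodup.map_on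
    · intro x hx y hy hxy
      have hx' : x < 10 := lt_of_lt_of_le (List.mem_range.mp hx) (min_le_right _ _)
      have hy' : y < 10 := lt_of_lt_of_le (List.mem_range.mp hy) (min_le_right _ _)
      simp only [PySem.Int.mod, Int.fmod_eq_emod] at hxy
      omega
    · exact List.nodup_range
  · intro z hz
    rw [List.map_map] at hz
    rcases List.mem_map.mp hz with ⟨x, hx, rfl⟩
    have hx' : x < m - min m 10 := List.mem_range.mp hx
    have hmin : min m 10 = 10 := by omega
    apply List.mem_map.mpr
    refine ⟨(min m 10 + x) % 10, List.mem_range.mpr (by omega), ?_⟩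
    simp only [Function.comp]
    apply pv_mod_congr
    omega

-- a fold of block-updates is the update by the flattened blocks
theorem pv_foldl_update_eq_flatMap {α β : Type} [BEq α] (G : β → List α) :
    ∀ (l : List β) (s : PySem.Set α),
      l.foldl (fun s t => PySem.Set.update s (G t)) s = PySem.Set.update s (l.flatMap G) := by
  intro l
  induction l with
  | nil => intro s; rfl
  | cons x xs ih =>
      intro s
      rw [List.foldl_cons, List.flatMap_cons, PySem.Set.update_append, ih]

-- update only depends on the dedup of its argument
theorem pv_update_congr {α : Type} [BEq α] [LawfulBEq α] (s : PySem.Set α) (l₁ l₂ : List α)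
    (h : PySem.Set.ofList l₁ = PySem.Set.ofList l₂) :
    PySem.Set.update s l₁ = PySem.Set.update s l₂ := by
  rw [PySem.Set.update_eq_append_filter, PySem.Set.update_eq_append_filter, h]

-- set(flatMap G l) only depends on the distinct elements of l
theorem pv_ofList_flatMap_dedup {α β : Type} [BEq β] [LawfulBEq β] [BEq α] [LawfulBEq α]
    (G : β → List α) (l : List β) :
    PySem.Set.ofList (l.flatMap G) = PySem.Set.ofList ((PySem.Set.ofList l).flatMap G) := by
  induction l using List.reverseRecOn with
  | nil => simp
  | append_singleton l x ih =>
      rw [List.flatMap_append, List.flatMap_singleton, PySem.Set.ofList_append, ih,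
        PySem.Set.ofList_append_singleton, PySem.Set.add_eq_ite]
      by_cases hx : x ∈ PySem.Set.ofList l
      · rw [if_pos hx]
        apply pv_update_of_subset
        intro y hy
        exact (PySem.Set.mem_ofList _ _).mpr (List.mem_flatMap.mpr ⟨x, hx, hy⟩)
      · rw [if_neg hx, List.flatMap_append, List.flatMap_singleton, PySem.Set.ofList_append]

-- set(map f l) only depends on the distinct elements of l
theorem pv_ofList_map_dedup {α β : Type} [BEq β] [LawfulBEq β] [BEq α] [LawfulBEq α]
    (f : β → α) (l : List β) :
    PySem.Set.ofList (l.map f) = PySem.Set.ofList ((PySem.Set.ofList l).map f) := by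
  have h := pv_ofList_flatMap_dedup (fun t => [f t]) l
  rwa [← List.map_eq_flatMap, ← List.map_eq_flatMap] at h

-- set(flatMap) is congruent in the blocks up to dedup of each block
theorem pv_ofList_flatMap_congr {α β : Type} [BEq α] [LawfulBEq α] (G₁ G₂ : β → List α)
    (l : List β) (h : ∀ t ∈ l, PySem.Set.ofList (G₁ t) = PySem.Set.ofList (G₂ t)) :
    PySem.Set.ofList (l.flatMap G₁) = PySem.Set.ofList (l.flatMap G₂) := by
  induction l with
  | nil => rfl
  | cons x xs ih =>
      rw [List.flatMap_cons, List.flatMap_cons, PySem.Set.ofList_append, PySem.Set.ofList_append,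
        h x List.mem_cons_self,
        pv_update_congr _ _ _ (ih (fun t ht => h t (List.mem_cons_of_mem _ ht)))]

-- A's nested pair loop over digits equals the pair set over the dedup of digits
theorem pv_pairs_eq (xs : List Int) (hx : ∀ d ∈ xs, 0 ≤ d ∧ d < 10) :
    xs.foldl
      (fun ps tens =>
        xs.foldl
          (fun (ps : PySem.Set Int) ones =>
            let num := tens * 10 + ones
            if 0 ≤ num ∧ num ≤ 99 then PySem.Set.add ps num else ps)
          ps)
      PySem.Set.empty
    = PySem.Set.ofList
        ((PySem.List.dedup xs).flatMap (fun tens => (PySem.List.dedup xs).map (fun ones => tens * 10 + ones))) := by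
  have hstep : ∀ (s : PySem.Set Int), ∀ t ∈ xs,
      xs.foldl
        (fun (ps : PySem.Set Int) ones =>
          let num := t * 10 + ones
          if 0 ≤ num ∧ num ≤ 99 then PySem.Set.add ps num else ps)
        s
      = PySem.Set.update s (xs.map (fun o => t * 10 + o)) := by
    intro s t ht
    rw [PySem.List.foldl_congr_mem xs _ (fun ps o => PySem.Set.add ps (t * 10 + o)) s ?_]
    · rw [PySem.Set.update_map_eq_foldl_add]
    · intro acc o ho
      have h1 := hx t ht
      have h2 := hx o ho
      have hb : 0 ≤ t * 10 + o ∧ t * 10 + o ≤ 99 := by omega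
      simp [hb]
  rw [PySem.List.foldl_congr_mem xs _
        (fun (s : PySem.Set Int) t => PySem.Set.update s (xs.map (fun o => t * 10 + o)))
        PySem.Set.empty (fun s t ht => hstep s t ht)]
  rw [show (PySem.Set.empty : PySem.Set Int) = [] from rfl]
  rw [pv_foldl_update_eq_flatMap, PySem.Set.update_nil_left,
    pv_ofList_flatMap_dedup (fun t => xs.map (fun o => t * 10 + o)) xs,
    PySem.List.dedup_eq_ofList]
  exact pv_ofList_flatMap_congr _ _ _ (fun t _ => pv_ofList_map_dedup (fun o => t * 10 + o) xs)

-- the two per-start name expressions agree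
theorem pv_name_eq (start length : Int) :
    PySem.Str.join "" (((PySem.List.pyRange 0 length 1).map (fun i => PySem.Int.mod (start + i) 10)).map PySem.Int.toStr)
      = String.ofList
          ((List.replicate (PySem.Int.floordiv (max length 0) 10).toNat
              (PySem.Str.join "" ((PySem.List.pyRange 0 10 1).map (fun i => PySem.Int.toStr (PySem.Int.mod (start + i) 10)))).toList).flatten
            ++ (PySem.Str.slice
                  (PySem.Str.join "" ((PySem.List.pyRange 0 10 1).map (fun i => PySem.Int.toStr (PySem.Int.mod (start + i) 10))))
                  none (some (PySem.Int.mod (max length 0) 10))).toList) := by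
  have hcycle : (PySem.Str.join "" ((PySem.List.pyRange 0 10 1).map (fun i => PySem.Int.toStr (PySem.Int.mod (start + i) 10)))).toList
      = (List.range 10).map (fun k : Nat => pvCh (start + k)) := by
    have h := pv_joinA_toList start 10
    rw [List.map_map] at h
    simp only [Function.comp_def] at h
    have h10 : ((10:Int)).toNat = 10 := rfl
    rw [h10] at h
    exact h
  have hLHS := pv_joinA_toList start length
  have hr0 : (0:Int) ≤ PySem.Int.mod (max length 0) 10 :=
    PySem.Int.mod_nonneg _ (by norm_num)
  have hq : (PySem.Int.floordiv (max length 0) 10).toNat = length.toNat / 10 := by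
    simp only [PySem.Int.floordiv, Int.fdiv_eq_ediv]
    omega
  have hr : (PySem.Int.mod (max length 0) 10).toNat = length.toNat % 10 := by
    simp only [PySem.Int.mod, Int.fmod_eq_emod]
    omega
  have hslice : (PySem.Str.slice
        (PySem.Str.join "" ((PySem.List.pyRange 0 10 1).map (fun i => PySem.Int.toStr (PySem.Int.mod (start + i) 10))))
        none (some (PySem.Int.mod (max length 0) 10))).toList
      = List.take (length.toNat % 10) ((List.range 10).map (fun k : Nat => pvCh (start + k))) := by
    rw [PySem.Str.toList_slice]
    have : PySem.Chars.slice
        (PySem.Str.join "" ((PySem.List.pyRange 0 10 1).map (fun i => PySem.Int.toStr (PySem.Int.mod (start + i) 10)))).toList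
        none (some (PySem.Int.mod (max length 0) 10))
      = List.take (PySem.Int.mod (max length 0) 10).toNat
          (PySem.Str.join "" ((PySem.List.pyRange 0 10 1).map (fun i => PySem.Int.toStr (PySem.Int.mod (start + i) 10)))).toList :=
      PySem.List.slice_to _ hr0
    rw [this, hcycle, hr]
  have hper : ∀ k : Nat, pvCh (start + (10 + k : Nat)) = pvCh (start + k) := by
    intro k
    apply pv_ch_congr
    push_cast
    omega
  have hmain := pv_range_periodic' (fun k : Nat => pvCh (start + k)) hper length.toNat
  have : (PySem.Str.join "" (((PySem.List.pyRange 0 length 1).map (fun i => PySem.Int.mod (start + i) 10)).map PySem.Int.toStr)).toList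
      = ((List.replicate (PySem.Int.floordiv (max length 0) 10).toNat
            (PySem.Str.join "" ((PySem.List.pyRange 0 10 1).map (fun i => PySem.Int.toStr (PySem.Int.mod (start + i) 10)))).toList).flatten
          ++ (PySem.Str.slice
                (PySem.Str.join "" ((PySem.List.pyRange 0 10 1).map (fun i => PySem.Int.toStr (PySem.Int.mod (start + i) 10))))
                none (some (PySem.Int.mod (max length 0) 10))).toList) := by
    rw [hLHS, hslice, hcycle, hq, hmain]
  calc PySem.Str.join "" (((PySem.List.pyRange 0 length 1).map (fun i => PySem.Int.mod (start + i) 10)).map PySem.Int.toStr)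
      = String.ofList (PySem.Str.join "" (((PySem.List.pyRange 0 length 1).map (fun i => PySem.Int.mod (start + i) 10)).map PySem.Int.toStr)).toList := by
        rw [String.ofList_toList]
    _ = _ := by rw [this]

-- the two per-start pair sets agree
theorem pv_set_eq (start length : Int) :
    ((PySem.List.pyRange 0 length 1).map (fun i => PySem.Int.mod (start + i) 10)).foldl
      (fun ps tens =>
        ((PySem.List.pyRange 0 length 1).map (fun i => PySem.Int.mod (start + i) 10)).foldl
          (fun (ps : PySem.Set Int) ones =>
            let num := tens * 10 + ones
            if 0 ≤ num ∧ num ≤ 99 then PySem.Set.add ps num else ps)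
          ps)
      PySem.Set.empty
    = PySem.Set.ofList
        (((PySem.List.pyRange 0 (min (max length 0) 10) 1).map (fun i => PySem.Int.mod (start + i) 10)).flatMap
          (fun tens => ((PySem.List.pyRange 0 (min (max length 0) 10) 1).map (fun i => PySem.Int.mod (start + i) 10)).map
            (fun ones => tens * 10 + ones))) := by
  have hx : ∀ d ∈ (PySem.List.pyRange 0 length 1).map (fun i => PySem.Int.mod (start + i) 10),
      0 ≤ d ∧ d < 10 := by
    intro d hd
    rcases List.mem_map.mp hd with ⟨i, _, rfl⟩
    exact ⟨PySem.Int.mod_nonneg _ (by norm_num), PySem.Int.mod_lt _ (by norm_num)⟩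
  rw [pv_pairs_eq _ hx]
  have hdigits : (PySem.List.pyRange 0 length 1).map (fun i => PySem.Int.mod (start + i) 10)
      = (List.range length.toNat).map (fun k : Nat => PySem.Int.mod (start + k) 10) := by
    rw [PySem.List.pyRange_one, List.map_map]
    have h3 : (length - 0).toNat = length.toNat := by omega
    rw [h3]
    apply List.map_congr_left
    intro k _
    simp only [Function.comp]
    norm_num
  have harc : (PySem.List.pyRange 0 (min (max length 0) 10) 1).map (fun i => PySem.Int.mod (start + i) 10)
      = (List.range (min length.toNat 10)).map (fun k : Nat => PySem.Int.mod (start + k) 10) := by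
    rw [PySem.List.pyRange_one, List.map_map]
    have h3 : (min (max length 0) 10 - 0).toNat = min length.toNat 10 := by omega
    rw [h3]
    apply List.map_congr_left
    intro k _
    simp only [Function.comp]
    norm_num
  rw [hdigits, harc, pv_dedup_range_map]

-- ===== VERDICT (by name: the statement is the Claim_ definition above) =====
theorem generate_pattern_sets_py_spec : Claim_equal_generate_pattern_sets_py := by
  unfold Claim_equal_generate_pattern_sets_py
  intro length _
  unfold Spec_generate_pattern_sets_py
  unfold generate_pattern_sets_py generate_pattern_sets_py_alt
  refine congrArg PySem.Dict.items ?_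
  refine PySem.List.foldl_congr_mem _ _ _ _ ?_
  intro patterns start _
  dsimp only
  rw [pv_name_eq start length, pv_set_eq start length]
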